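-- pv_equiv track=rewrite | github.com/g-d-l/project_euler | done/240.py | distributions
-- ===== SOURCE A (Python) =====
-- def distributions(n, k, m):
--     def recurse(n, k, kcount, m, grid):
--         if grid[n][k] != -1:
--             return grid[n][k]
--         elif n == 0:
--             grid[n][k] = 1
--             return grid[n][k]
--         elif k >= kcount:
--             return 0
--         else:
--             result = 0
--             for b in range(min(n + 1, m + 1)):
--                 result += recurse(n - b, k + 1, kcount, m, grid)
--             grid[n][k] = result
--             return grid[n][k]
--
--     grid = [[-1 for x in range(k + 1)] for y in range(n + 1)]
--     return recurse(n, 0, k, m, grid)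
-- ===== SOURCE B (Python) =====
-- def distributions(n, k, m):
--     # number of k-tuples of integers in [0, m] summing to n,
--     # computed level-by-level with prefix sums (sliding window) over n
--     if n == 0:
--         return 1
--     if n < 0 or m < 0:
--         return 0
--     w = m + 1
--     dp = [1] + [0] * n
--     for _ in range(k):
--         pref = [0] * (n + 2)
--         for i in range(n + 1):
--             pref[i + 1] = pref[i] + dp[i]
--         dp = [pref[s + 1] - pref[max(0, s + 1 - w)] for s in range(n + 1)]
--     return dp[n]
-- ===== Notes on version B (the rewrite author's own statement) =====
-- stated objective: faster
-- what changed: Replaced the memoized top-down recursion with an iterative level-by-level DP over the k slots that uses prefix sums so each sliding-window sum over b in [0,m] costs O(1), removing both the recursion and the inner window loop.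
import Mathlib
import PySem

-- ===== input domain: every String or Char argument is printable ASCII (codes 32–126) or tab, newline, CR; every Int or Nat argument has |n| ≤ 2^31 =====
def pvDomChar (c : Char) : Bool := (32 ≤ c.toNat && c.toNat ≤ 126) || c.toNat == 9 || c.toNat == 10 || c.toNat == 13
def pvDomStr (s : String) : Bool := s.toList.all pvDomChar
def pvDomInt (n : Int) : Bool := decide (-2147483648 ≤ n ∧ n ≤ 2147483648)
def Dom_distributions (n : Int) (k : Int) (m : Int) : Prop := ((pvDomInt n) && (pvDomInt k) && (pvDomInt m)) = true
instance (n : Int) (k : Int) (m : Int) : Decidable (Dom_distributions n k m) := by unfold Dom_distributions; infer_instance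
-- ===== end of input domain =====

-- B replaces A's memoized recursion by an iterative prefix-sum DP over the k slots (measured faster).

-- ===== PORT A =====
-- grid[n][k] read / write (indices are nonnegative and in range on every access A performs inside Pre_)
def pvGGet (g : List (List Int)) (n kk : Int) : Int :=
  PySem.List.pyGetD (PySem.List.pyGetD g n []) kk (-1)

def pvGSet (g : List (List Int)) (n kk : Int) (v : Int) : List (List Int) :=
  g.set n.toNat ((PySem.List.pyGetD g n []).set kk.toNat v)

-- 'recurse' of A, state-passing (the mutated grid is threaded); 'fuel' only bounds the
-- recursion depth (each call increases k, which stays below kcount), it never alters a value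
-- reached within Pre_.
def pvRecurse (m kcount : Int) : Nat → Int → Int → List (List Int) → Int × List (List Int)
  | 0, _, _, g => (0, g)
  | Nat.succ fuel, n, k, g =>
    let cur := pvGGet g n k
    if cur ≠ -1 then (cur, g)
    else if n = 0 then
      let g1 := pvGSet g n k 1
      (pvGGet g1 n k, g1)
    else if kcount ≤ k then (0, g)
    else
      -- 'for b in range(min(n+1, m+1)): result += recurse(n-b, k+1, …)' threading the grid
      let p := (PySem.List.pyRange 0 (min (n + 1) (m + 1)) 1).foldl
        (fun (ac : Int × List (List Int)) b =>
          let r := pvRecurse m kcount fuel (n - b) (k + 1) ac.2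
          (ac.1 + r.1, r.2)) (0, g)
      let g2 := pvGSet p.2 n k p.1
      (pvGGet g2 n k, g2)

def distributions (n : Int) (k : Int) (m : Int) : Int :=
  let grid := List.replicate (n + 1).toNat (List.replicate (k + 1).toNat (-1))
  (pvRecurse m k (k.toNat + 1) n 0 grid).1

-- ===== PORT B =====
-- pref[i+1] = pref[i] + dp[i] of Source B (running prefix sums)
def pvPrefix : Int → List Int → List Int
  | a, [] => [a]
  | a, x :: xs => a :: pvPrefix (a + x) xs

def distributions_alt (n : Int) (k : Int) (m : Int) : Int :=
  if n = 0 then 1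
  else if n < 0 ∨ m < 0 then 0
  else
    let w := m + 1
    let N := n.toNat
    let dp0 : List Int := 1 :: List.replicate N 0
    let dp := (List.range k.toNat).foldl
      (fun dp _ =>
        let pref := pvPrefix 0 dp
        (List.range (N + 1)).map (fun s : Nat =>
          PySem.List.pyGetD pref ((s : Int) + 1) 0
            - PySem.List.pyGetD pref (max 0 ((s : Int) + 1 - w)) 0)) dp0
    PySem.List.pyGetD dp n 0

-- ===== PRECONDITION & SPEC =====
-- A raises IndexError when n < 0 (empty grid row lookup) or k < 0 (indexing an empty row);
-- Pre_ excludes exactly those inputs.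
def Pre_distributions (n : Int) (k : Int) (m : Int) : Prop := 0 ≤ n ∧ 0 ≤ k
instance (n : Int) (k : Int) (m : Int) : Decidable (Pre_distributions n k m) := by
  unfold Pre_distributions; infer_instance

def pvWitness_distributions : Int × Int × Int := (5, 3, 2)

def Spec_distributions (n : Int) (k : Int) (m : Int) (out : Int) : Prop := out = distributions_alt n k m
instance (n : Int) (k : Int) (m : Int) (out : Int) : Decidable (Spec_distributions n k m out) := by
  unfold Spec_distributions; infer_instance

-- ===== CLAIM (what is proved, stated in full; the proofs are below) =====
def Claim_equal_distributions : Prop := ∀ (n : Int) (k : Int) (m : Int), Dom_distributions n k m → Pre_distributions n k m → Spec_distributions n k m (distributions n k m)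

-- ===== LEMMAS AND PROOFS =====

-- mathematical value both programs compute: number of j-tuples in [0,M] summing to s
def pvCount (M : Nat) : Nat → Nat → Int
  | _, 0 => 1
  | 0, _ + 1 => 0
  | j + 1, s + 1 =>
    ((List.range (min (s + 2) (M + 1))).map (fun b => pvCount M j (s + 1 - b))).sum



-- grid cell read at Nat indices (what pvGGet computes on in-range nonnegative indices)
def pvGG (g : List (List Int)) (i j : Nat) : Int := (g.getD i []).getD j (-1)

-- grid invariant: correct shape, every cell is -1 (unset) or the memoized correct value
def pvInv (N K M : Nat) (g : List (List Int)) : Prop :=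
  g.length = N + 1 ∧ (∀ row ∈ g, row.length = K + 1) ∧
  ∀ i j, i ≤ N → j ≤ K → pvGG g i j = -1 ∨ pvGG g i j = pvCount M (K - j) i

lemma pvGGet_cast (g : List (List Int)) (i j : Nat) :
    pvGGet g (i : Int) (j : Int) = pvGG g i j := by
  simp [pvGGet, pvGG, PySem.List.pyGetD_natCast]

lemma pvGSet_cast (g : List (List Int)) (i j : Nat) (v : Int) :
    pvGSet g (i : Int) (j : Int) v = g.set i ((g.getD i []).set j v) := by
  simp [pvGSet, PySem.List.pyGetD_natCast]

lemma pvRow_len {N K M : Nat} {g : List (List Int)} (h : pvInv N K M g) {i : Nat}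
    (hi : i ≤ N) : (g.getD i []).length = K + 1 := by
  have hlt : i < g.length := by rw [h.1]; omega
  have hD : g.getD i [] = g[i]'hlt := by
    simp [List.getD, List.getElem?_eq_getElem hlt]
  rw [hD]
  exact h.2.1 _ (List.getElem_mem hlt)

lemma pvGG_set (g : List (List Int)) (v : Int) (i j i' j' : Nat)
    (hi : i < g.length) (hj : j < (g.getD i []).length) :
    pvGG (g.set i ((g.getD i []).set j v)) i' j' =
      if i' = i ∧ j' = j then v else pvGG g i' j' := by
  unfold pvGG
  simp only [List.getD] at hj ⊢
  rw [List.getElem?_set]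
  by_cases h1 : i' = i
  · subst h1
    rw [if_pos rfl, if_pos hi]
    simp only [Option.getD_some]
    rw [List.getElem?_set]
    by_cases h2 : j' = j
    · subst h2
      rw [if_pos rfl, if_pos hj]
      simp
    · rw [if_neg (fun h => h2 h.symm)]
      simp [h2]
  · rw [if_neg (fun h => h1 h.symm)]
    simp [h1]

lemma pvGG_set_self (g : List (List Int)) (v : Int) (i j : Nat)
    (hi : i < g.length) (hj : j < (g.getD i []).length) :
    pvGG (g.set i ((g.getD i []).set j v)) i j = v := by
  rw [pvGG_set g v i j i j hi hj]; simp

lemma pvInv_set {N K M : Nat} {g : List (List Int)} (h : pvInv N K M g) {i j : Nat}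
    (hi : i ≤ N) (hj : j ≤ K) {v : Int} (hv : v = pvCount M (K - j) i) :
    pvInv N K M (g.set i ((g.getD i []).set j v)) := by
  have hilt : i < g.length := by rw [h.1]; omega
  have hjlt : j < (g.getD i []).length := by rw [pvRow_len h hi]; omega
  refine ⟨by simp [h.1], ?_, ?_⟩
  · intro row hrow
    rcases List.mem_or_eq_of_mem_set hrow with h' | h'
    · exact h.2.1 _ h'
    · rw [h', List.length_set]
      exact pvRow_len h hi
  · intro i' j' hi' hj'
    rw [pvGG_set g v i j i' j' hilt hjlt]
    split_ifs with hij
    · right; rw [hij.1, hij.2, hv]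
    · exact h.2.2 i' j' hi' hj'

lemma pvCount_zero_right (M j : Nat) : pvCount M j 0 = 1 := by
  cases j <;> simp [pvCount]

lemma pvCount_zero_succ (M s : Nat) : pvCount M 0 (s + 1) = 0 := rfl

lemma pvCount_succ_succ (M j s : Nat) : pvCount M (j + 1) (s + 1) =
    ((List.range (min (s + 2) (M + 1))).map (fun b => pvCount M j (s + 1 - b))).sum := rfl

-- with m < 0 no part can be chosen, so no positive total is reachable
lemma pvCount_M0 (j s : Nat) : pvCount 0 j (s + 1) = 0 := by
  induction j with
  | zero => rfl
  | succ j ih =>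
    rw [pvCount_succ_succ]
    have h1 : min (s + 2) (0 + 1) = 1 := by omega
    rw [h1, List.range_one]
    simpa using ih

lemma pvFold_correct (m : Int) (M K N fuel : Nat)
    (IH : ∀ (i j : Nat) (g : List (List Int)), pvInv N K M g → i ≤ N → j ≤ K → K - j < fuel →
      (pvRecurse m (K : Int) fuel (i : Int) (j : Int) g).1 = pvCount M (K - j) i ∧
      pvInv N K M (pvRecurse m (K : Int) fuel (i : Int) (j : Int) g).2)
    (i j : Nat) (hi : i ≤ N) (hjK : j < K) (hf : K - (j + 1) < fuel) :
    ∀ (bs : List Int), (∀ b ∈ bs, 0 ≤ b ∧ b ≤ (i : Int)) → ∀ (acc : Int) (g : List (List Int)),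
      pvInv N K M g →
      (bs.foldl (fun (ac : Int × List (List Int)) b =>
          (ac.1 + (pvRecurse m (K : Int) fuel ((i : Int) - b) ((j : Int) + 1) ac.2).1,
           (pvRecurse m (K : Int) fuel ((i : Int) - b) ((j : Int) + 1) ac.2).2)) (acc, g)).1
        = acc + (bs.map (fun b => pvCount M (K - (j + 1)) ((i : Int) - b).toNat)).sum ∧
      pvInv N K M ((bs.foldl (fun (ac : Int × List (List Int)) b =>
          (ac.1 + (pvRecurse m (K : Int) fuel ((i : Int) - b) ((j : Int) + 1) ac.2).1,
           (pvRecurse m (K : Int) fuel ((i : Int) - b) ((j : Int) + 1) ac.2).2)) (acc, g)).2) := by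
  intro bs
  induction bs with
  | nil => intro _ acc g hg; exact ⟨by simp, hg⟩
  | cons b bs ihbs =>
    intro hmem acc g hg
    have hb := hmem b (List.mem_cons_self ..)
    have hcast1 : (i : Int) - b = ((i - b.toNat : Nat) : Int) := by push_cast; omega
    have hcast2 : ((j : Int) + 1) = ((j + 1 : Nat) : Int) := by omega
    have hr := IH (i - b.toNat) (j + 1) g hg (by omega) (by omega) hf
    rw [← hcast1, ← hcast2] at hr
    simp only [List.foldl_cons]
    have hrest := ihbs (fun b' hb' => hmem b' (List.mem_cons_of_mem _ hb'))
      (acc + (pvRecurse m (K : Int) fuel ((i : Int) - b) ((j : Int) + 1) g).1)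
      (pvRecurse m (K : Int) fuel ((i : Int) - b) ((j : Int) + 1) g).2 hr.2
    refine ⟨?_, hrest.2⟩
    rw [hrest.1, hr.1]
    simp only [List.map_cons, List.sum_cons]
    have h2 : ((i : Int) - b).toNat = i - b.toNat := by omega
    rw [h2]
    ring

lemma pvRecurse_correct (m : Int) (M K N : Nat) (hM : M = m.toNat) :
    ∀ (fuel : Nat) (i j : Nat) (g : List (List Int)), pvInv N K M g → i ≤ N → j ≤ K →
      K - j < fuel →
      (pvRecurse m (K : Int) fuel (i : Int) (j : Int) g).1 = pvCount M (K - j) i ∧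
      pvInv N K M (pvRecurse m (K : Int) fuel (i : Int) (j : Int) g).2 := by
  intro fuel
  induction fuel with
  | zero => intro i j g _ _ _ hf; omega
  | succ fuel IH =>
    intro i j g hg hi hj hf
    have hilt : i < g.length := by rw [hg.1]; omega
    have hjlt : j < (g.getD i []).length := by rw [pvRow_len hg hi]; omega
    have hcell := hg.2.2 i j hi hj
    simp only [pvRecurse, pvGGet_cast, pvGSet_cast]
    split_ifs with h1 h2 h3
    · -- memo hit
      rcases hcell with hmiss | hhit
      · exact absurd hmiss h1
      · exact ⟨hhit, hg⟩
    · -- n == 0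
      have hi0 : i = 0 := by exact_mod_cast h2
      constructor
      · rw [pvGG_set_self g 1 i j hilt hjlt, hi0, pvCount_zero_right]
      · exact pvInv_set hg hi hj (by rw [hi0, pvCount_zero_right])
    · -- k >= kcount (so j = K) and n > 0
      have hKj : K ≤ j := by exact_mod_cast h3
      have hjK : j = K := le_antisymm hj hKj
      have hi0 : i ≠ 0 := by
        intro h; apply h2; rw [h]; norm_num
      obtain ⟨i', rfl⟩ : ∃ i', i = i' + 1 := ⟨i - 1, by omega⟩
      subst hjK
      refine ⟨?_, hg⟩
      rw [Nat.sub_self, pvCount_zero_succ]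
    · -- recursive case
      have hjK : j < K := by
        rcases Nat.lt_or_ge j K with h | h
        · exact h
        · exact absurd (by exact_mod_cast h : ((K : Int) ≤ (j : Int))) h3
      have hi0 : i ≠ 0 := by
        intro h; apply h2; rw [h]; norm_num
      obtain ⟨t, ht⟩ : ∃ t, K - j = t + 1 := ⟨K - j - 1, by omega⟩
      have htK : K - (j + 1) = t := by omega
      by_cases hm : 0 ≤ m
      · -- positive m: the range is range(min(i+1, M+1))
        have hmM : m = (M : Int) := by omega
        have hmin : min ((i : Int) + 1) (m + 1) = ((min (i + 1) (M + 1) : Nat) : Int) := by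
          rw [hmM]; push_cast; omega
        have hrange : PySem.List.pyRange 0 (min ((i : Int) + 1) (m + 1)) 1 =
            (List.range (min (i + 1) (M + 1))).map (fun b : Nat => (b : Int)) := by
          rw [hmin]; exact PySem.List.pyRange_zero_natCast _
        rw [hrange]
        have hmem : ∀ b ∈ (List.range (min (i + 1) (M + 1))).map (fun b : Nat => (b : Int)),
            0 ≤ b ∧ b ≤ (i : Int) := by
          intro b hb
          simp only [List.mem_map, List.mem_range] at hb
          obtain ⟨bn, hbn, rfl⟩ := hb
          refine ⟨Int.natCast_nonneg bn, ?_⟩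
          have : bn ≤ i := by omega
          exact_mod_cast this
        have hfold := pvFold_correct m M K N fuel IH i j hi hjK (by omega)
          ((List.range (min (i + 1) (M + 1))).map (fun b : Nat => (b : Int))) hmem 0 g hg
        have hsum : (0 : Int) +
            ((((List.range (min (i + 1) (M + 1))).map (fun b : Nat => (b : Int))).map
              (fun b => pvCount M (K - (j + 1)) ((i : Int) - b).toNat)).sum) =
            pvCount M (K - j) i := by
          obtain ⟨i', rfl⟩ : ∃ i', i = i' + 1 := ⟨i - 1, by omega⟩
          rw [ht, pvCount_succ_succ, htK, List.map_map, zero_add]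
          apply congrArg
          apply List.map_congr_left
          intro bn hbn
          simp only [List.mem_range] at hbn
          simp only [Function.comp_apply]
          congr 1
          omega
        rw [hfold.1, hsum]
        constructor
        · exact pvGG_set_self _ _ _ _ (by rw [(hfold.2).1]; omega)
            (by rw [pvRow_len hfold.2 hi]; omega)
        · exact pvInv_set hfold.2 hi hj rfl
      · -- negative m: empty range, result 0, and pvCount is 0 as well
        have hM0 : M = 0 := by omega
        have hrange : PySem.List.pyRange 0 (min ((i : Int) + 1) (m + 1)) 1 = [] := by
          apply PySem.List.pyRange_one_eq_nil
          omega
        rw [hrange]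
        simp only [List.foldl_nil]
        obtain ⟨i', rfl⟩ : ∃ i', i = i' + 1 := ⟨i - 1, by omega⟩
        have hcnt : pvCount M (K - j) (i' + 1) = 0 := by
          rw [ht, hM0, pvCount_M0]
        constructor
        · rw [pvGG_set_self g 0 (i' + 1) j hilt hjlt, hcnt]
        · exact pvInv_set hg hi hj hcnt.symm
      
-- initial grid satisfies the invariant
lemma pvInv_init (N K M : Nat) :
    pvInv N K M (List.replicate (N + 1) (List.replicate (K + 1) (-1 : Int))) := by
  refine ⟨by simp, ?_, ?_⟩
  · intro row hrow
    rw [List.eq_of_mem_replicate hrow]; simp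
  · intro i j hi hj
    left
    unfold pvGG
    have e1 : (List.replicate (N + 1) (List.replicate (K + 1) (-1 : Int))).getD i [] =
        List.replicate (K + 1) (-1 : Int) := by
      rw [List.getD_eq_getElem _ _ (by simp; omega)]
      simp
    rw [e1, List.getD_eq_getElem _ _ (by simp; omega)]
    simp

lemma pvA_eq (n k m : Int) (hn : 0 ≤ n) (hk : 0 ≤ k) :
    distributions n k m = pvCount m.toNat k.toNat n.toNat := by
  obtain ⟨N, rfl⟩ : ∃ N : Nat, n = (N : Int) := ⟨n.toNat, by omega⟩
  obtain ⟨K, rfl⟩ : ∃ K : Nat, k = (K : Int) := ⟨k.toNat, by omega⟩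
  unfold distributions
  have hg1 : (((N : Int)) + 1).toNat = N + 1 := by omega
  have hg2 : (((K : Int)) + 1).toNat = K + 1 := by omega
  rw [hg1, hg2]
  simp only [Int.toNat_natCast]
  have hmain := pvRecurse_correct m m.toNat K N rfl (K + 1) N 0
    (List.replicate (N + 1) (List.replicate (K + 1) (-1 : Int)))
    (pvInv_init N K m.toNat) (le_refl N) (by omega) (by omega)
  simpa using hmain.1

-- ===== B-side =====

def pvDP (M j N : Nat) : List Int := (List.range (N + 1)).map (fun s => pvCount M j s)

lemma pvPrefix_getD : ∀ (xs : List Int) (a : Int) (t : Nat), t ≤ xs.length →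
    (pvPrefix a xs).getD t 0 = a + (xs.take t).sum := by
  intro xs
  induction xs with
  | nil =>
    intro a t ht
    have h0 : t = 0 := by simpa using ht
    subst h0
    simp [pvPrefix]
  | cons x xs ih =>
    intro a t ht
    cases t with
    | zero => simp [pvPrefix]
    | succ t =>
      simp only [pvPrefix, List.getD_cons_succ, List.take_succ_cons, List.sum_cons]
      rw [ih (a + x) t (by simpa using ht)]
      ring

-- a difference of prefix sums is the corresponding descending window sum
lemma pvWindow (f : Nat → Int) (lo s : Nat) (h : lo ≤ s + 1) :
    ((List.range (s + 1)).map f).sum - ((List.range lo).map f).sum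
      = ((List.range (s + 1 - lo)).map (fun b => f (s - b))).sum := by
  have bridge : ∀ (n : Nat) (g : Nat → Int),
      ((List.range n).map g).sum = ∑ x ∈ Finset.range n, g x := by
    intro n g
    exact Int.neg_inj.mp rfl
  rw [bridge, bridge, bridge]
  rw [← Finset.sum_Ico_eq_sub f h, Finset.sum_Ico_eq_sum_range, ← Finset.sum_range_reflect]
  apply Finset.sum_congr rfl
  intro x hx
  simp only [Finset.mem_range] at hx
  congr 1
  omega

lemma pvDP_len (M j N : Nat) : (pvDP M j N).length = N + 1 := by simp [pvDP]

lemma pvDP_zero (M N : Nat) : pvDP M 0 N = 1 :: List.replicate N 0 := by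
  apply List.ext_getElem
  · simp [pvDP]
  · intro i h1 h2
    simp only [pvDP, List.getElem_map, List.getElem_range]
    cases i with
    | zero => simp [pvCount_zero_right]
    | succ i =>
      rw [pvCount_zero_succ]
      simp only [List.getElem_cons_succ, List.getElem_replicate]

lemma pvStep (M N j : Nat) :
    ((List.range (N + 1)).map fun s : Nat =>
      PySem.List.pyGetD (pvPrefix 0 (pvDP M j N)) ((s : Int) + 1) 0 -
        PySem.List.pyGetD (pvPrefix 0 (pvDP M j N)) (max 0 ((s : Int) + 1 - ((M : Int) + 1))) 0)
    = pvDP M (j + 1) N := by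
  rw [show pvDP M (j + 1) N = (List.range (N + 1)).map (fun s => pvCount M (j + 1) s) from rfl]
  apply List.map_congr_left
  intro s hs
  simp only [List.mem_range] at hs
  have hc1 : ((s : Int) + 1) = ((s + 1 : Nat) : Int) := by omega
  have hc2 : max 0 ((s : Int) + 1 - ((M : Int) + 1)) = ((s - M : Nat) : Int) := by
    omega
  rw [hc2, hc1, PySem.List.pyGetD_natCast, PySem.List.pyGetD_natCast]
  rw [pvPrefix_getD _ _ _ (by rw [pvDP_len]; omega),
      pvPrefix_getD _ _ _ (by rw [pvDP_len]; omega)]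
  have htake : ∀ t : Nat, t ≤ N + 1 →
      ((pvDP M j N).take t) = (List.range t).map (fun s => pvCount M j s) := by
    intro t ht
    unfold pvDP
    rw [← List.map_take, List.take_range, Nat.min_eq_left ht]
  rw [htake (s + 1) (by omega), htake (s - M) (by omega), zero_add, zero_add]
  rw [pvWindow (fun s => pvCount M j s) (s - M) s (by omega)]
  cases s with
  | zero =>
    have h1 : 0 + 1 - (0 - M) = 1 := by omega
    rw [h1, List.range_one, pvCount_zero_right]
    simp [pvCount_zero_right]
  | succ s' =>
    have hc : s' + 1 + 1 - (s' + 1 - M) = min (s' + 2) (M + 1) := by omega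
    rw [hc]
    exact (pvCount_succ_succ M j s').symm

lemma pvFoldDP (M N : Nat) : ∀ (t : Nat),
    (List.range t).foldl (fun dp _ =>
      (List.range (N + 1)).map fun s : Nat =>
        PySem.List.pyGetD (pvPrefix 0 dp) ((s : Int) + 1) 0 -
          PySem.List.pyGetD (pvPrefix 0 dp) (max 0 ((s : Int) + 1 - ((M : Int) + 1))) 0)
      (pvDP M 0 N) = pvDP M t N := by
  intro t
  induction t with
  | zero => simp
  | succ t ih =>
    rw [show List.range (t + 1) = List.range t ++ [t] from List.range_succ,
      List.foldl_append, ih]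
    simp only [List.foldl_cons, List.foldl_nil]
    exact pvStep M N t

lemma pvB_eq (n k m : Int) (hn : 0 ≤ n) (hk : 0 ≤ k) (hm : 0 ≤ m) :
    distributions_alt n k m = pvCount m.toNat k.toNat n.toNat := by
  by_cases h0 : n = 0
  · subst h0
    simp [distributions_alt, pvCount_zero_right]
  · obtain ⟨N, rfl⟩ : ∃ N : Nat, n = (N : Int) := ⟨n.toNat, by omega⟩
    obtain ⟨K, rfl⟩ : ∃ K : Nat, k = (K : Int) := ⟨k.toNat, by omega⟩
    obtain ⟨M, rfl⟩ : ∃ M : Nat, m = (M : Int) := ⟨m.toNat, by omega⟩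
    have hneg : ¬ (((N : Int)) < 0 ∨ ((M : Int)) < 0) := by
      rintro (h | h) <;> omega
    simp only [distributions_alt, h0, if_false, hneg, Int.toNat_natCast]
    rw [← pvDP_zero M N, pvFoldDP M N K, PySem.List.pyGetD_natCast]
    simp only [pvDP]
    rw [List.getD_eq_getElem _ _ (by simp)]
    simp

lemma pvB_neg (n k m : Int) (hm : m < 0) :
    distributions_alt n k m = if n = 0 then 1 else 0 := by
  by_cases h0 : n = 0
  · simp [distributions_alt, h0]
  · simp [distributions_alt, h0, hm]

-- ===== VERDICT (by name: the statement is the Claim_ definition above) =====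
theorem distributions_spec : Claim_equal_distributions := by
  intro n k m _ hpre
  unfold Spec_distributions
  obtain ⟨hn, hk⟩ := hpre
  by_cases hm : 0 ≤ m
  · rw [pvA_eq n k m hn hk, pvB_eq n k m hn hk hm]
  · rw [pvA_eq n k m hn hk, pvB_neg n k m (by omega)]
    have hM0 : m.toNat = 0 := by omega
    rw [hM0]
    by_cases h0 : n = 0
    · subst h0
      simp [pvCount_zero_right]
    · obtain ⟨N, hN⟩ : ∃ N : Nat, n.toNat = N + 1 := ⟨n.toNat - 1, by omega⟩
      rw [hN, pvCount_M0]
      simp [h0]
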